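-- pv_equiv track=rewrite | github.com/Janecjy/ccBench | pantheon-modified/src/experiments/palantir_datasetgen_rtt.py | count_valid_rtt_blocks
-- ===== SOURCE A (Python) =====
-- def count_valid_rtt_blocks(lines, two_owd) -> int:
--     """
--     Counts how many valid (10,6) blocks can be formed for this file
--     in RTT-based mode, WITHOUT actually building the blocks.
--
--     Each block = 10 RTT-chunks, each RTT-chunk = lines_per_rtt lines.
--     We'll do the same validity checks (column count, etc.).
--     """
--     lines_per_rtt = int(two_owd / 10.0)  # each line = 10 ms
--     chunk_size_in_lines = 10 * lines_per_rtt
--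
--     num_valid = 0
--     n = len(lines)
--
--     # We'll move in steps of chunk_size_in_lines
--     for start in range(0, n, chunk_size_in_lines):
--         if start + chunk_size_in_lines > n:
--             break  # incomplete block of 10 RTT-chunks
--
--         valid_block = True
--
--         # For each of the 10 RTT-chunks in this block
--         for rtt_idx in range(10):
--             sub_start = start + rtt_idx * lines_per_rtt
--             sub_end   = sub_start + lines_per_rtt
--             # check each line
--             for line in lines[sub_start : sub_end]:
--                 cols = line.split()
--                 if len(cols) < 77:
--                     valid_block = False
--                     break
--             if not valid_block:
--                 break
--
--         if valid_block:
--             num_valid += 1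
--
--     return num_valid
-- ===== SOURCE B (Python) =====
-- def count_valid_rtt_blocks(lines, two_owd) -> int:
--     lines_per_rtt = int(two_owd / 10.0)
--     cs = 10 * lines_per_rtt
--     n = len(lines)
--     # prefix[i] = number of invalid lines (fewer than 77 columns) among lines[:i]
--     prefix = [0]
--     bad = 0
--     for line in lines:
--         if len(line.split()) < 77:
--             bad += 1
--         prefix.append(bad)
--     count = 0
--     for start in range(0, n, cs):
--         if start + cs <= n and prefix[start + cs] == prefix[start]:
--             count += 1
--     return count
-- ===== Notes on version B (the rewrite author's own statement) =====
-- stated objective: alternative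
-- what changed: A re-scans each block with a nested 10-chunk/per-line flag-and-break loop; B makes one prefix-sum pass counting invalid lines and then decides each complete block with a single O(1) prefix-difference comparison.
import Mathlib
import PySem

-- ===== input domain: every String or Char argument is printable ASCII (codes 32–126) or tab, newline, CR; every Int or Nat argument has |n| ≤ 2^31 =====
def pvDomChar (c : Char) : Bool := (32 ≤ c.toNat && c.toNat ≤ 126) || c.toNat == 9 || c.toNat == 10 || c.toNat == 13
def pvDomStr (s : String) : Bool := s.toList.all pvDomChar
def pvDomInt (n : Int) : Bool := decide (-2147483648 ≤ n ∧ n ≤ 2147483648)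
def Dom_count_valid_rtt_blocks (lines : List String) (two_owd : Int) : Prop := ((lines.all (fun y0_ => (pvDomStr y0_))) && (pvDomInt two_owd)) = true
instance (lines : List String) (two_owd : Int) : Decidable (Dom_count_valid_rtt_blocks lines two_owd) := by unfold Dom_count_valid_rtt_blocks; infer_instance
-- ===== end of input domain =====

-- B replaces A's nested per-block/per-chunk re-scan (with flag and breaks) by one prefix-sum
-- pass over the lines followed by an O(1) check per block (objective: alternative decomposition).

-- ===== PORT A =====
-- inner 'for line in lines[sub_start:sub_end]: … break' with the valid_block flag
def pvAChunk (chunk : List String) (valid : Bool) : Bool :=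
  match chunk with
  | [] => valid
  | line :: rest =>
    if ((PySem.Str.split₀ line).length : Int) < 77 then false  -- valid_block = False; break
    else pvAChunk rest valid

-- 'for rtt_idx in range(10): … if not valid_block: break'
def pvABlock (lines : List String) (start lpr : Int) (rttIdxs : List Int) (valid : Bool) : Bool :=
  match rttIdxs with
  | [] => valid
  | i :: rest =>
    let subStart := start + i * lpr
    let subEnd := subStart + lpr
    let valid' := pvAChunk (PySem.List.slice lines (some subStart) (some subEnd)) valid
    if !valid' then valid' else pvABlock lines start lpr rest valid'

-- 'for start in range(0, n, chunk_size_in_lines): if start + chunk_size_in_lines > n: break …'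
def pvALoop (lines : List String) (cs lpr n : Int) (starts : List Int) (acc : Int) : Int :=
  match starts with
  | [] => acc
  | start :: rest =>
    if start + cs > n then acc  -- break: incomplete block
    else
      let valid := pvABlock lines start lpr (PySem.List.pyRange 0 10 1) true
      pvALoop lines cs lpr n rest (if valid then acc + 1 else acc)

def count_valid_rtt_blocks (lines : List String) (two_owd : Int) : Int :=
  -- int(two_owd / 10.0): exact truncated division for |two_owd| ≤ 2^31 (float quotient
  -- rounds to the true value's side of every integer), ported as PySem.Int.truncdiv
  let lines_per_rtt := PySem.Int.truncdiv two_owd 10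
  let chunk_size_in_lines := 10 * lines_per_rtt
  let n : Int := lines.length
  pvALoop lines chunk_size_in_lines lines_per_rtt n (PySem.List.pyRange 0 n chunk_size_in_lines) 0

-- ===== PORT B =====
-- 'prefix = [0]; bad = 0; for line in lines: …; prefix.append(bad)'
def pvBPrefix (lines : List String) : List Int :=
  (lines.foldl (fun (st : List Int × Int) line =>
      let bad := if ((PySem.Str.split₀ line).length : Int) < 77 then st.2 + 1 else st.2
      (st.1 ++ [bad], bad)) ([0], 0)).1

def count_valid_rtt_blocks_alt (lines : List String) (two_owd : Int) : Int :=
  let lines_per_rtt := PySem.Int.truncdiv two_owd 10  -- int(two_owd / 10.0), exact as in port A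
  let cs := 10 * lines_per_rtt
  let n : Int := lines.length
  let pre := pvBPrefix lines
  (PySem.List.pyRange 0 n cs).foldl
    (fun count start =>
      if start + cs ≤ n ∧ PySem.List.pyGetD pre (start + cs) 0 = PySem.List.pyGetD pre start 0
      then count + 1 else count) 0

-- ===== PRECONDITION & SPEC =====
-- Pre_ excludes exactly -10 < two_owd < 10, where chunk_size_in_lines = 0 and both A's and
-- B's range(0, n, 0) raise ValueError.
def Pre_count_valid_rtt_blocks (lines : List String) (two_owd : Int) : Prop :=
  two_owd ≤ -10 ∨ 10 ≤ two_owd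
instance (lines : List String) (two_owd : Int) : Decidable (Pre_count_valid_rtt_blocks lines two_owd) := by unfold Pre_count_valid_rtt_blocks; infer_instance

def pvWitness_count_valid_rtt_blocks : List String × Int := (["a b c"], 10)

def Spec_count_valid_rtt_blocks (lines : List String) (two_owd : Int) (out : Int) : Prop := out = count_valid_rtt_blocks_alt lines two_owd
instance (lines : List String) (two_owd : Int) (out : Int) : Decidable (Spec_count_valid_rtt_blocks lines two_owd out) := by unfold Spec_count_valid_rtt_blocks; infer_instance

-- ===== CLAIM (what is proved, stated in full; the proofs are below) =====
def Claim_equal_count_valid_rtt_blocks : Prop := ∀ (lines : List String) (two_owd : Int), Dom_count_valid_rtt_blocks lines two_owd → Pre_count_valid_rtt_blocks lines two_owd → Spec_count_valid_rtt_blocks lines two_owd (count_valid_rtt_blocks lines two_owd)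

-- ===== LEMMAS AND PROOFS =====

-- the per-line invalidity test both programs use
def pvInv (line : String) : Bool := ((PySem.Str.split₀ line).length : Int) < 77

-- number of invalid lines in a list, as an Int
def pvCnt (xs : List String) : Int := (xs.countP pvInv : Int)

lemma pvAChunk_spec (chunk : List String) :
    pvAChunk chunk true = !chunk.any pvInv := by
  induction chunk with
  | nil => rfl
  | cons l rest ih =>
    simp only [pvAChunk, List.any_cons, pvInv]
    by_cases h : ((PySem.Str.split₀ l).length : Int) < 77 <;> simp [h, ih]

lemma pvABlock_all (lines : List String) (start lpr : Int) (idxs : List Int) :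
    pvABlock lines start lpr idxs true
      = idxs.all (fun i =>
          !(PySem.List.slice lines (some (start + i * lpr)) (some (start + i * lpr + lpr))).any pvInv) := by
  induction idxs with
  | nil => rfl
  | cons i rest ih =>
    simp only [pvABlock, pvAChunk_spec, List.all_cons]
    by_cases h : (PySem.List.slice lines (some (start + i * lpr)) (some (start + i * lpr + lpr))).any pvInv
      <;> simp [h, ih]

-- splitting an int-bounded slice at an interior point
lemma pvSlice_append (xs : List String) (a b c : Int) (hab : a ≤ b) (hbc : b ≤ c) (ha : 0 ≤ a) :
    PySem.List.slice xs (some a) (some c)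
      = PySem.List.slice xs (some a) (some b) ++ PySem.List.slice xs (some b) (some c) := by
  have hb : 0 ≤ b := le_trans ha hab
  have hc : 0 ≤ c := le_trans hb hbc
  rw [PySem.List.slice_toNat _ ha hc, PySem.List.slice_toNat _ ha hb, PySem.List.slice_toNat _ hb hc]
  have h1 : a.toNat ≤ b.toNat := Int.toNat_le_toNat hab
  have h2 : b.toNat ≤ c.toNat := Int.toNat_le_toNat hbc
  have : c.toNat - a.toNat = (b.toNat - a.toNat) + (c.toNat - b.toNat) := by omega
  rw [this, List.take_add]
  congr 1
  rw [List.drop_drop]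
  congr 2
  omega

-- the 10 RTT-chunks of a block exactly cover the block's slice
lemma pvChunks_cover (lines : List String) (start lpr : Int) (ha : 0 ≤ start) (hl : 0 < lpr) (k : Nat) :
    ((PySem.List.pyRange 0 (k : Int) 1).all (fun i =>
        !(PySem.List.slice lines (some (start + i * lpr)) (some (start + i * lpr + lpr))).any pvInv))
    = !(PySem.List.slice lines (some start) (some (start + (k : Int) * lpr))).any pvInv := by
  induction k with
  | zero =>
    simp [PySem.List.pyRange_one_eq_nil (by omega : (0:Int) ≤ 0), PySem.List.slice_toNat _ ha ha]
  | succ k ih =>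
    have hrange : PySem.List.pyRange 0 ((k:Int)+1) 1
        = PySem.List.pyRange 0 (k:Int) 1 ++ [(k:Int)] :=
      PySem.List.pyRange_one_succ_right (by positivity)
    have hsplit := pvSlice_append lines start (start + (k:Int)*lpr) (start + ((k:Int)+1)*lpr)
      (by nlinarith) (by nlinarith) ha
    push_cast
    rw [hrange]
    simp only [List.all_append, List.all_cons, List.all_nil, ih, hsplit, List.any_append]
    have : start + (k:Int) * lpr + lpr = start + ((k:Int)+1) * lpr := by ring
    rw [this]
    cases h1 : (PySem.List.slice lines (some start) (some (start + (k:Int)*lpr))).any pvInv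
      <;> cases h2 : (PySem.List.slice lines (some (start + (k:Int)*lpr)) (some (start + ((k:Int)+1)*lpr))).any pvInv
      <;> simp

-- the prefix list B builds, characterised
lemma pvCnt_cons (l : String) (xs : List String) :
    pvCnt (l :: xs) = (if ((PySem.Str.split₀ l).length : Int) < 77 then 1 else 0) + pvCnt xs := by
  simp only [pvCnt, List.countP_cons, pvInv]
  by_cases h : ((PySem.Str.split₀ l).length : Int) < 77 <;> simp [h] <;> omega

lemma pvBPrefix_aux (lines : List String) (pre : List Int) (b : Int) :
    (lines.foldl (fun (st : List Int × Int) line =>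
        let bad := if ((PySem.Str.split₀ line).length : Int) < 77 then st.2 + 1 else st.2
        (st.1 ++ [bad], bad)) (pre, b)).1
      = pre ++ (List.range lines.length).map (fun i => b + pvCnt (lines.take (i+1))) := by
  induction lines generalizing pre b with
  | nil => simp
  | cons l rest ih =>
    simp only [List.foldl_cons, List.length_cons]
    rw [ih, List.range_succ_eq_map, List.map_cons, List.map_map]
    rw [List.append_assoc]
    congr 1
    rw [List.singleton_append]
    congr 1
    · simp only [List.take_succ_cons, List.take_zero, pvCnt_cons]
      by_cases h : ((PySem.Str.split₀ l).length : Int) < 77 <;> simp [h, pvCnt]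
    · apply List.map_congr_left
      intro i _
      simp only [Function.comp_apply, Nat.succ_eq_add_one, List.take_succ_cons, pvCnt_cons]
      by_cases h : ((PySem.Str.split₀ l).length : Int) < 77 <;> simp [h] <;> ring

lemma pvBPrefix_eq (lines : List String) :
    pvBPrefix lines = (List.range (lines.length + 1)).map (fun i => pvCnt (lines.take i)) := by
  unfold pvBPrefix
  rw [pvBPrefix_aux, List.range_succ_eq_map, List.map_cons, List.map_map]
  simp [pvCnt, Nat.succ_eq_add_one]

lemma pvPrefix_get (lines : List String) (i : Int) (h0 : 0 ≤ i) (h1 : i ≤ (lines.length : Int)) :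
    PySem.List.pyGetD (pvBPrefix lines) i 0 = pvCnt (lines.take i.toNat) := by
  rw [PySem.List.pyGetD_eq_getElem (pvBPrefix lines) 0 h0
    (by rw [pvBPrefix_eq]; simp; omega)]
  simp only [pvBPrefix_eq, List.getElem_map, List.getElem_range]

-- B's per-block condition ↔ the block's slice has no invalid line
lemma pvBCond_iff (lines : List String) (s cs : Int) (hs : 0 ≤ s) (hcs : 0 < cs)
    (hle : s + cs ≤ (lines.length : Int)) :
    (PySem.List.pyGetD (pvBPrefix lines) (s + cs) 0 = PySem.List.pyGetD (pvBPrefix lines) s 0)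
      ↔ (!(PySem.List.slice lines (some s) (some (s + cs))).any pvInv) = true := by
  rw [pvPrefix_get _ _ (by omega) hle, pvPrefix_get _ _ hs (by omega)]
  have htn : (s + cs).toNat = s.toNat + cs.toNat := by omega
  have : lines.take (s+cs).toNat = lines.take s.toNat ++ (PySem.List.slice lines (some s) (some (s + cs))) := by
    rw [PySem.List.slice_toNat _ hs (by omega), htn, List.take_add]
    congr 2
    omega
  rw [this]
  simp only [pvCnt, List.countP_append]
  rw [Bool.not_eq_eq_eq_not, Bool.not_true, List.any_eq_false]
  constructor
  · intro h x hx
    have : (PySem.List.slice lines (some s) (some (s + cs))).countP pvInv = 0 := by omega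
    rw [List.countP_eq_zero] at this
    exact this x hx
  · intro h
    have : (PySem.List.slice lines (some s) (some (s + cs))).countP pvInv = 0 :=
      List.countP_eq_zero.mpr h
    omega

-- a B-fold over starts that are all past the last complete block adds nothing
lemma pvBFold_none (lines : List String) (cs n : Int) (starts : List Int) (acc : Int)
    (h : ∀ s ∈ starts, ¬ (s + cs ≤ n)) :
    starts.foldl (fun count start =>
      if start + cs ≤ n ∧ PySem.List.pyGetD (pvBPrefix lines) (start + cs) 0 = PySem.List.pyGetD (pvBPrefix lines) start 0
      then count + 1 else count) acc = acc := by
  induction starts generalizing acc with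
  | nil => rfl
  | cons s rest ih =>
    simp only [List.foldl_cons]
    rw [if_neg (by intro hc; exact h s (by simp) hc.1)]
    exact ih _ (fun x hx => h x (List.mem_cons_of_mem _ hx))

-- main loop equivalence over an increasing list of nonnegative starts
lemma pvLoop_eq (lines : List String) (lpr : Int) (hl : 0 < lpr) (starts : List Int) (acc : Int)
    (hmono : starts.Pairwise (· ≤ ·)) (hpos : ∀ s ∈ starts, 0 ≤ s) :
    pvALoop lines (10 * lpr) lpr (lines.length : Int) starts acc
      = starts.foldl (fun count start =>
          if start + 10 * lpr ≤ (lines.length : Int) ∧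
             PySem.List.pyGetD (pvBPrefix lines) (start + 10 * lpr) 0 = PySem.List.pyGetD (pvBPrefix lines) start 0
          then count + 1 else count) acc := by
  induction starts generalizing acc with
  | nil => rfl
  | cons s rest ih =>
    have hs0 : 0 ≤ s := hpos s (by simp)
    simp only [pvALoop, List.foldl_cons]
    by_cases hbr : s + 10 * lpr > (lines.length : Int)
    · rw [if_pos hbr, if_neg (by intro hc; omega)]
      rw [pvBFold_none]
      intro x hx
      have : s ≤ x := (List.pairwise_cons.mp hmono).1 x hx
      omega
    · rw [if_neg hbr]
      rw [not_lt] at hbr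
      have hval : pvABlock lines s lpr (PySem.List.pyRange 0 10 1) true
          = !(PySem.List.slice lines (some s) (some (s + 10 * lpr))).any pvInv := by
        rw [pvABlock_all]
        have := pvChunks_cover lines s lpr hs0 hl 10
        push_cast at this
        convert this using 2
      have hcond := pvBCond_iff lines s (10 * lpr) hs0 (by omega) hbr
      rw [ih _ (List.pairwise_cons.mp hmono).2 (fun x hx => hpos x (List.mem_cons_of_mem _ hx))]
      congr 1
      rw [hval]
      by_cases hB : PySem.List.pyGetD (pvBPrefix lines) (s + 10 * lpr) 0 = PySem.List.pyGetD (pvBPrefix lines) s 0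
      · rw [if_pos (hcond.mp hB), if_pos ⟨hbr, hB⟩]
      · rw [if_neg (fun h => hB (hcond.mpr h)), if_neg (fun hc => hB hc.2)]

lemma pvRange_neg_empty (n s : Int) (h1 : 0 ≤ n) (h2 : s < 0) :
    PySem.List.pyRange 0 n s = [] := by
  simp only [PySem.List.pyRange, if_neg (by omega : ¬ s = 0), if_neg (by omega : ¬ 0 < s),
    if_neg (by omega : ¬ n < 0)]
  simp

lemma pvRange_mono (a b s : Int) (hs : 0 < s) :
    (PySem.List.pyRange a b s).Pairwise (· ≤ ·) := by
  rw [PySem.List.pyRange_of_pos a b hs]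
  apply List.Pairwise.map
  · intro m n hmn
    have : (m : Int) ≤ n := by exact_mod_cast le_of_lt hmn
    nlinarith
  · exact List.pairwise_lt_range

-- ===== VERDICT (by name: the statement is the Claim_ definition above) =====
theorem count_valid_rtt_blocks_spec : Claim_equal_count_valid_rtt_blocks := by
  intro lines two_owd _ hpre
  unfold Spec_count_valid_rtt_blocks
  simp only [count_valid_rtt_blocks, count_valid_rtt_blocks_alt, PySem.Int.truncdiv]
  rcases hpre with h | h
  · -- two_owd ≤ -10: the step 10 * lines_per_rtt is negative and range(0, n, step) is empty
    have hlpr : two_owd.tdiv 10 < 0 := by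
      have : two_owd.tdiv 10 = -((-two_owd).tdiv 10) := by rw [Int.neg_tdiv]; ring_nf
      rw [this, Int.tdiv_eq_ediv_of_nonneg (by omega)]
      omega
    rw [pvRange_neg_empty _ _ (by positivity) (by omega)]
    rfl
  · -- 10 ≤ two_owd: positive step, full loop equivalence
    have hlpr : 0 < two_owd.tdiv 10 := by
      rw [Int.tdiv_eq_ediv_of_nonneg (by omega)]
      omega
    exact pvLoop_eq lines (two_owd.tdiv 10) hlpr _ 0
      (pvRange_mono _ _ _ (by omega))
      (fun s hs => ((PySem.List.mem_pyRange_iff_of_pos (by omega) s).mp hs).1)
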